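-- pv_equiv track=rewrite | github.com/BlazingDB/blazingsql | pyblazing/pyblazing/apiv2/hive.py | filterHivePartitionsWithUserPartitions
-- ===== SOURCE A (Python) =====
-- def filterHivePartitionsWithUserPartitions(hive_partitions, user_partitions):
--     new_hive_partitions = {}
--     for user_partition in user_partitions:
--         user_partition_values_str = [str(val) for val in user_partitions[user_partition]]
--         for hive_partition in hive_partitions:
--             for col_tuple in hive_partitions[hive_partition]:
--                 if col_tuple[0] == user_partition:
--                     if col_tuple[1] in user_partition_values_str:
--                         new_hive_partitions[hive_partition] = hive_partitions[hive_partition]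
--                         break
--         hive_partitions = new_hive_partitions
--         new_hive_partitions = {}
--     return hive_partitions
-- ===== SOURCE B (Python) =====
-- def filterHivePartitionsWithUserPartitions(hive_partitions, user_partitions):
--     allowed = [(u, [str(v) for v in vals]) for u, vals in user_partitions.items()]
--     return {hp: cols
--             for hp, cols in hive_partitions.items()
--             if all(any(c[0] == u and c[1] in vals for c in cols)
--                    for u, vals in allowed)}
-- ===== Notes on version B (the rewrite author's own statement) =====
-- stated objective: simpler
-- what changed: A repeatedly rebuilds and reassigns the partition dict once per user-partition key (round-by-round shrinking); B makes a single pass over hive_partitions keeping each partition that satisfies one all/any membership predicate over all user-partition keys at once.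
import Mathlib
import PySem

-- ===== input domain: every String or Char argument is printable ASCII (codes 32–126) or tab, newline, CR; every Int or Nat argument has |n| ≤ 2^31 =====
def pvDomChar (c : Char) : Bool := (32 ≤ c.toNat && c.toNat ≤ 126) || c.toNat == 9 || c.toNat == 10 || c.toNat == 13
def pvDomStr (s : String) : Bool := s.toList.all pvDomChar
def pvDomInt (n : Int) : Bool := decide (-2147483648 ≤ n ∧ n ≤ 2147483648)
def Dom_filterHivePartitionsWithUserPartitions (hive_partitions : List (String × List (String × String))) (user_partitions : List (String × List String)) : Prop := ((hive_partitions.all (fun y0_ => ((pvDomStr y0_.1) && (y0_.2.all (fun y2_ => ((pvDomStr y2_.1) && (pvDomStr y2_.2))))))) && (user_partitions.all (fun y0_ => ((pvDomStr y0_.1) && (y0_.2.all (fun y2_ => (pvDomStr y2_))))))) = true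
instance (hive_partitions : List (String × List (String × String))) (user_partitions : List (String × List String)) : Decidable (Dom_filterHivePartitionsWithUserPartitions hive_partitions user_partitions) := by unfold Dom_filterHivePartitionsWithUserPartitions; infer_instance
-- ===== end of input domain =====

-- B replaces A's round-by-round dict rebuilding (one shrinking pass per user-partition key) with a
-- single filter pass using one all/any predicate; objective: simpler. Return values agree; A may
-- return the argument object itself when user_partitions is empty, B always builds a fresh dict
-- (identity, not value, differs).

-- ===== PORT A =====
-- inner 'for col_tuple in …' loop with its break: returns whether the partition is kept this round
-- (str(val) is the identity on the str-typed values, so the [str(val) …] list is the value list itself)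
def pvAScan (u : String) (vals : List String) : List (String × String) → Bool
  | [] => false
  | c :: rest =>
      if c.1 = u then
        (if vals.contains c.2 then true else pvAScan u vals rest)
      else pvAScan u vals rest

-- one round: rebuild new_hive_partitions from the current dict's items (fresh distinct keys ⇒ append)
def pvARound (hp : List (String × List (String × String))) (u : String) (vals : List String) :
    List (String × List (String × String)) :=
  hp.foldl (fun acc pr => if pvAScan u vals pr.2 then acc ++ [pr] else acc) []

-- both dict parameters are read through their Python-dict interpretation (PySem.Dict.ofList)
def filterHivePartitionsWithUserPartitions (hive_partitions : List (String × List (String × String))) (user_partitions : List (String × List String)) : List (String × List (String × String)) :=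
  ((PySem.Dict.ofList user_partitions).items).foldl
    (fun hp uv => pvARound hp uv.1 uv.2)
    ((PySem.Dict.ofList hive_partitions).items)

-- ===== PORT B =====
def filterHivePartitionsWithUserPartitions_alt (hive_partitions : List (String × List (String × String))) (user_partitions : List (String × List String)) : List (String × List (String × String)) :=
  let allowed := ((PySem.Dict.ofList user_partitions).items).map (fun uv => (uv.1, uv.2.map (fun v => v)))
  ((PySem.Dict.ofList hive_partitions).items).filter
    (fun pr => allowed.all (fun uv => pr.2.any (fun c => c.1 == uv.1 && uv.2.contains c.2)))

-- ===== PRECONDITION & SPEC =====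
def Spec_filterHivePartitionsWithUserPartitions (hive_partitions : List (String × List (String × String))) (user_partitions : List (String × List String)) (out : List (String × List (String × String))) : Prop := out = filterHivePartitionsWithUserPartitions_alt hive_partitions user_partitions
instance (hive_partitions : List (String × List (String × String))) (user_partitions : List (String × List String)) (out : List (String × List (String × String))) : Decidable (Spec_filterHivePartitionsWithUserPartitions hive_partitions user_partitions out) := by unfold Spec_filterHivePartitionsWithUserPartitions; infer_instance

-- ===== CLAIM (what is proved, stated in full; the proofs are below) =====
def Claim_equal_filterHivePartitionsWithUserPartitions : Prop := ∀ (hive_partitions : List (String × List (String × String))) (user_partitions : List (String × List String)), Dom_filterHivePartitionsWithUserPartitions hive_partitions user_partitions → Spec_filterHivePartitionsWithUserPartitions hive_partitions user_partitions (filterHivePartitionsWithUserPartitions hive_partitions user_partitions)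

-- ===== LEMMAS AND PROOFS =====

-- A's inner loop is the any-membership predicate B uses
theorem pvAScan_eq_any (u : String) (vals : List String) (cols : List (String × String)) :
    pvAScan u vals cols = cols.any (fun c => c.1 == u && vals.contains c.2) := by
  induction cols with
  | nil => rfl
  | cons c rest ih =>
      simp only [pvAScan, List.any_cons]
      by_cases h1 : c.1 = u
      · have h2 : (vals.contains c.2 = true) ↔ c.2 ∈ vals := List.contains_iff_mem
        by_cases h3 : c.2 ∈ vals
        · simp [h1, h2, h3]
        · simp [h1, h2, h3, ih]
      · simp [h1, ih]

-- one round of A is a filter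
theorem pvARound_eq_filter (hp : List (String × List (String × String))) (u : String) (vals : List String) :
    pvARound hp u vals = hp.filter (fun pr => pvAScan u vals pr.2) := by
  simpa using PySem.List.foldl_append_if_eq_filter (fun pr => pvAScan u vals pr.2) hp ([])

-- folding filters over a list of predicates is one filter by the conjunction
theorem foldl_filter_eq_filter_all {α β : Type} (p : β → α → Bool) :
    ∀ (us : List β) (hp : List α),
      us.foldl (fun acc uv => acc.filter (p uv)) hp
        = hp.filter (fun x => us.all (fun uv => p uv x)) := by
  intro us
  induction us with
  | nil => intro hp; simp
  | cons a rest ih =>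
      intro hp
      simp only [List.foldl_cons, ih, List.filter_filter, List.all_cons]
      exact List.filter_congr (fun x _ => by rw [Bool.and_comm])

-- ===== VERDICT (by name: the statement is the Claim_ definition above) =====
theorem filterHivePartitionsWithUserPartitions_spec : Claim_equal_filterHivePartitionsWithUserPartitions := by
  intro hive user _
  show _ = _
  unfold filterHivePartitionsWithUserPartitions filterHivePartitionsWithUserPartitions_alt
  have hstep : (fun (hp : List (String × List (String × String))) (uv : String × List String) => pvARound hp uv.1 uv.2)
      = fun hp uv => hp.filter (fun pr => pvAScan uv.1 uv.2 pr.2) := by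
    funext hp uv; exact pvARound_eq_filter hp uv.1 uv.2
  rw [hstep]
  have hmain := foldl_filter_eq_filter_all
      (fun (uv : String × List String) (pr : String × List (String × String)) => pvAScan uv.1 uv.2 pr.2)
      ((PySem.Dict.ofList user).items) ((PySem.Dict.ofList hive).items)
  rw [hmain]
  simp [pvAScan_eq_any, List.map_id']
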